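-- pv_equiv track=rewrite | github.com/ungureancatalina/UBB--FMI | AN_2/SEM_2/AI/lab1/ex1.py | ultimul_cuvant
-- ===== SOURCE A (Python) =====
-- def ultimul_cuvant(text):
--     elemente=text.split()
--     ultimul=elemente[0].lower()
--     for el in elemente:
--         el=el.lower()
--         if el>ultimul:
--             ultimul=el
--     return ultimul
-- ===== SOURCE B (Python) =====
-- def ultimul_cuvant(text):
--     parole = sorted(w.lower() for w in text.split())
--     return parole[-1]
-- ===== Notes on version B (the rewrite author's own statement) =====
-- stated objective: simpler
-- what changed: Replaces the running-maximum loop seeded with the first word by sorting the lowercased word list and returning its last element.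
import Mathlib
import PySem

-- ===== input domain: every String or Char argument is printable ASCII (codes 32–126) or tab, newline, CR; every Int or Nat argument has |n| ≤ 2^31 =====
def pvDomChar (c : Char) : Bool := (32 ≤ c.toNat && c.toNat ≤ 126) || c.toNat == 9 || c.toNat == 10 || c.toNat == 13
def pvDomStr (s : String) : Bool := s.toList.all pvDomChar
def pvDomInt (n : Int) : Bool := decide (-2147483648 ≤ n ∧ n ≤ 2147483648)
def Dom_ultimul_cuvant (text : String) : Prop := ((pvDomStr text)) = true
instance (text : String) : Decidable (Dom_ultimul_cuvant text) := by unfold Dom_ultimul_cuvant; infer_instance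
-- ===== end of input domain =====

-- B replaces A's running-maximum loop by sorting the lowercased words and taking the last; same value wherever A returns.

-- ===== PORT A =====
def ultimul_cuvant (text : String) : String :=
  let elemente := PySem.Str.split₀ text
  let ultimul := PySem.Str.lower (PySem.List.pyGetD elemente 0 "")
  elemente.foldl (fun ultimul el =>
    let el := PySem.Str.lower el
    if ultimul < el then el else ultimul) ultimul

-- ===== PORT B =====
def ultimul_cuvant_alt (text : String) : String :=
  let parole := PySem.List.sorted ((PySem.Str.split₀ text).map PySem.Str.lower) (fun x => x) false
  PySem.List.pyGetD parole (-1) ""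

-- ===== PRECONDITION & SPEC =====
-- Pre_ excludes exactly the texts with no words (whitespace-only), on which A raises IndexError.
def Pre_ultimul_cuvant (text : String) : Prop := PySem.Str.split₀ text ≠ []
instance (text : String) : Decidable (Pre_ultimul_cuvant text) := by unfold Pre_ultimul_cuvant; infer_instance
def pvWitness_ultimul_cuvant : String := "Ana are Mere"

def Spec_ultimul_cuvant (text : String) (out : String) : Prop := out = ultimul_cuvant_alt text
instance (text : String) (out : String) : Decidable (Spec_ultimul_cuvant text out) := by unfold Spec_ultimul_cuvant; infer_instance

-- ===== CLAIM (what is proved, stated in full; the proofs are below) =====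
def Claim_equal_ultimul_cuvant : Prop := ∀ (text : String), Dom_ultimul_cuvant text → Pre_ultimul_cuvant text → Spec_ultimul_cuvant text (ultimul_cuvant text)

-- ===== LEMMAS AND PROOFS =====

-- last element of a (≤)-pairwise list bounds every member
theorem le_getLast_of_pairwise {α : Type} [LinearOrder α] (s : List α) :
    ∀ (h : s ≠ []), s.Pairwise (· ≤ ·) → ∀ y ∈ s, y ≤ s.getLast h := by
  induction s with
  | nil => simp
  | cons x t ih =>
    intro h hp y hy
    rcases List.pairwise_cons.mp hp with ⟨hx, hp'⟩
    cases t with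
    | nil => simp_all
    | cons z t' =>
      rw [List.getLast_cons (by simp)]
      rcases List.mem_cons.mp hy with rfl | hy'
      · exact hx _ (List.getLast_mem _)
      · exact ih (by simp) hp' y hy'

-- the running max over w :: t is the last element of sorted (w :: t)
theorem foldl_max_eq_getLast_sorted {α : Type} [LinearOrder α] (w : α) (t : List α) :
    t.foldl max w =
      (PySem.List.sorted (w :: t) (fun x => x) false).getLast
        (by simp [PySem.List.sorted_eq_nil_iff]) := by
  set s := PySem.List.sorted (w :: t) (fun x => x) false with hs
  have hne : s ≠ [] := by simp [hs, PySem.List.sorted_eq_nil_iff]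
  have hperm : s.Perm (w :: t) := PySem.List.sorted_perm _ _ _
  have hpw : s.Pairwise (· ≤ ·) := by
    have := PySem.List.sorted_pairwise (xs := w :: t) (key := fun x => x)
    simpa [hs] using this
  have hlast_mem : s.getLast hne ∈ (w :: t) := hperm.mem_iff.mp (List.getLast_mem hne)
  have hfold_mem : t.foldl max w ∈ (w :: t) := by
    rcases PySem.List.foldl_max_mem t w with h | h
    · simp [h]
    · simp [h]
  have hub := PySem.List.le_foldl_max t w
  have h1 : s.getLast hne ≤ t.foldl max w := by
    rcases List.mem_cons.mp hlast_mem with heq | hm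
    · exact heq ▸ hub.1
    · exact hub.2 _ hm
  have h2 : t.foldl max w ≤ s.getLast hne := by
    apply le_getLast_of_pairwise s hne hpw
    exact hperm.mem_iff.mpr hfold_mem
  exact le_antisymm h2 h1

-- ===== VERDICT (by name: the statement is the Claim_ definition above) =====
theorem ultimul_cuvant_spec : Claim_equal_ultimul_cuvant := by
  intro text _ hpre
  unfold Spec_ultimul_cuvant ultimul_cuvant ultimul_cuvant_alt
  obtain ⟨e0, rest, he⟩ := List.exists_cons_of_ne_nil hpre
  simp only [he, PySem.List.pyGetD_zero_cons, List.foldl_cons]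
  have hmax : ∀ (u e : String), (if u < PySem.Str.lower e then PySem.Str.lower e else u)
      = max u (PySem.Str.lower e) := by
    intro u e
    rcases lt_or_ge u (PySem.Str.lower e) with h | h
    · simp [h, max_eq_right h.le]
    · simp [not_lt_of_ge h, max_eq_left h]
  have hA : rest.foldl (fun ultimul el =>
        let el := PySem.Str.lower el
        if ultimul < el then el else ultimul)
        (if PySem.Str.lower e0 < PySem.Str.lower e0 then PySem.Str.lower e0 else PySem.Str.lower e0)
      = (rest.map PySem.Str.lower).foldl max (PySem.Str.lower e0) := by
    rw [List.foldl_map]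
    simp only [hmax, max_self]
  rw [hA, List.map_cons, foldl_max_eq_getLast_sorted (PySem.Str.lower e0) (rest.map PySem.Str.lower)]
  rw [PySem.List.pyGetD_neg_one]
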